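-- pv_equiv track=rewrite | github.com/CodecoolGlobal/ask-mate-3-python-KisLorand | sort.py | compare_questions
-- ===== SOURCE A (Python) =====
-- def compare_questions(all_questions_copy, first_value, order_type):
--     new_first_value = all_questions_copy[0]
--     for compared_question in all_questions_copy:
--         compared_order = compared_question[order_type]
--
--         if compared_order.isdigit():
--             if int(first_value[order_type]) < int(compared_question[order_type]):
--                 new_first_value = compared_question
--         else:
--             if first_value[order_type] < compared_question[order_type]:
--                 new_first_value = compared_question
--     return new_first_value
-- ===== SOURCE B (Python) =====
-- def compare_questions(all_questions_copy, first_value, order_type):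
--     base = first_value[order_type]
--
--     def exceeds(q):
--         v = q[order_type]
--         return (int(base) < int(v)) if v.isdigit() else (base < v)
--
--     return next((q for q in reversed(all_questions_copy) if exceeds(q)),
--                 all_questions_copy[0])
-- ===== Notes on version B (the rewrite author's own statement) =====
-- stated objective: simpler
-- what changed: Replaces the forward loop that keeps overwriting an accumulator with a single reverse scan that returns the first (i.e. last-in-order) element satisfying the same exceeds-predicate, defaulting to the first element.
import Mathlib
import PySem

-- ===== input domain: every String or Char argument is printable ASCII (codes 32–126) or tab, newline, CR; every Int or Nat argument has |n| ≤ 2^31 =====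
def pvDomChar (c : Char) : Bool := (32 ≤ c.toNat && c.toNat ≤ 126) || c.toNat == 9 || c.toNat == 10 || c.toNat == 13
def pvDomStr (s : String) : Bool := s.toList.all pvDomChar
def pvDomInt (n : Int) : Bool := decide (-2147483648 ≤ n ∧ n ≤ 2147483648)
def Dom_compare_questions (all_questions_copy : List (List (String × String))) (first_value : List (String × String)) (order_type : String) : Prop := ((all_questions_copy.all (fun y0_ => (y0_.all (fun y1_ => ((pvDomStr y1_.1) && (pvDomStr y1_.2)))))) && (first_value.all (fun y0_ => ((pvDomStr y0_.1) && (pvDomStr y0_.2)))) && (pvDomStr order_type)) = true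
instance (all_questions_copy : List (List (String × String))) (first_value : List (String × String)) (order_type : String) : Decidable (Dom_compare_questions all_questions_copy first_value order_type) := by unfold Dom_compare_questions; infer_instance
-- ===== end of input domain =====

-- ===== PORT A =====
-- B changes the decomposition only: a reverse scan with early return instead of a forward
-- accumulator loop; same per-element predicate, same result.
-- dict[k] on the association list: first matching key (Python dict lookup); none = KeyError
def pvLookup (d : List (String × String)) (k : String) : Option String :=
  (d.find? (fun p => p.1 == k)).map (·.2)

def compare_questions (all_questions_copy : List (List (String × String))) (first_value : List (String × String)) (order_type : String) : List (String × String) :=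
  let init := (PySem.List.pyGet? all_questions_copy 0).getD []
  all_questions_copy.foldl (fun new_first_value compared_question =>
    if PySem.Str.strIsdigit ((pvLookup compared_question order_type).getD "") then
      if (PySem.Int.ofStr? ((pvLookup first_value order_type).getD "")).getD 0
          < (PySem.Int.ofStr? ((pvLookup compared_question order_type).getD "")).getD 0 then
        compared_question
      else new_first_value
    else
      if ((pvLookup first_value order_type).getD "") < ((pvLookup compared_question order_type).getD "") then
        compared_question
      else new_first_value) init

-- ===== PORT B =====
-- transliteration of Source B's nested 'def exceeds(q)' (base = first_value[order_type])
def pvExceeds (first_value : List (String × String)) (order_type : String) (q : List (String × String)) : Bool :=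
  let base := (pvLookup first_value order_type).getD ""
  let v := (pvLookup q order_type).getD ""
  if PySem.Str.strIsdigit v then
    decide ((PySem.Int.ofStr? base).getD 0 < (PySem.Int.ofStr? v).getD 0)
  else decide (base < v)

def compare_questions_alt (all_questions_copy : List (List (String × String))) (first_value : List (String × String)) (order_type : String) : List (String × String) :=
  match all_questions_copy.reverse.find? (pvExceeds first_value order_type) with
  | some q => q
  | none => (PySem.List.pyGet? all_questions_copy 0).getD []

-- ===== PRECONDITION & SPEC =====
-- Exactly the inputs on which A returns: nonempty list, order_type present in every dict and in
-- first_value, and first_value's entry parses as int whenever some compared entry is all digits.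
def Pre_compare_questions (all_questions_copy : List (List (String × String))) (first_value : List (String × String)) (order_type : String) : Prop :=
  all_questions_copy ≠ [] ∧ (pvLookup first_value order_type).isSome ∧
  (∀ q ∈ all_questions_copy, (pvLookup q order_type).isSome) ∧
  ((∃ q ∈ all_questions_copy, PySem.Str.strIsdigit ((pvLookup q order_type).getD "")) →
    (PySem.Int.ofStr? ((pvLookup first_value order_type).getD "")).isSome)
instance (all_questions_copy : List (List (String × String))) (first_value : List (String × String)) (order_type : String) : Decidable (Pre_compare_questions all_questions_copy first_value order_type) := by unfold Pre_compare_questions; infer_instance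

def pvWitness_compare_questions : (List (List (String × String))) × (List (String × String)) × String :=
  ([[("k", "2")], [("k", "apple")]], [("k", "1")], "k")

def Spec_compare_questions (all_questions_copy : List (List (String × String))) (first_value : List (String × String)) (order_type : String) (out : List (String × String)) : Prop := out = compare_questions_alt all_questions_copy first_value order_type
instance (all_questions_copy : List (List (String × String))) (first_value : List (String × String)) (order_type : String) (out : List (String × String)) : Decidable (Spec_compare_questions all_questions_copy first_value order_type out) := by unfold Spec_compare_questions; infer_instance

-- ===== CLAIM (what is proved, stated in full; the proofs are below) =====
def Claim_equal_compare_questions : Prop := ∀ (all_questions_copy : List (List (String × String))) (first_value : List (String × String)) (order_type : String), Dom_compare_questions all_questions_copy first_value order_type → Pre_compare_questions all_questions_copy first_value order_type → Spec_compare_questions all_questions_copy first_value order_type (compare_questions all_questions_copy first_value order_type)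

-- ===== LEMMAS AND PROOFS =====
-- the last element of xs satisfying p (kept by A's overwrite loop) is the first element of
-- xs.reverse satisfying p (returned by B's reverse scan)
theorem foldl_keep_last_eq_reverse_find {α : Type} (p : α → Bool) (xs : List α) (init : α) :
    xs.foldl (fun acc x => if p x then x else acc) init = (xs.reverse.find? p).getD init := by
  induction xs generalizing init with
  | nil => rfl
  | cons x xs ih =>
    simp only [List.foldl_cons, List.reverse_cons, List.find?_append]
    rw [ih]
    cases xs.reverse.find? p with
    | some a => rfl
    | none => cases hp : p x <;> simp [List.find?, hp]

-- A's loop body is exactly 'keep q when pvExceeds first_value order_type q'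
theorem bodyA_eq (fv : List (String × String)) (ot : String) :
    (fun (nfv q : List (String × String)) =>
      if PySem.Str.strIsdigit ((pvLookup q ot).getD "") then
        if (PySem.Int.ofStr? ((pvLookup fv ot).getD "")).getD 0
            < (PySem.Int.ofStr? ((pvLookup q ot).getD "")).getD 0 then q else nfv
      else if ((pvLookup fv ot).getD "") < ((pvLookup q ot).getD "") then q else nfv)
    = (fun nfv q => if pvExceeds fv ot q then q else nfv) := by
  funext nfv q
  simp only [pvExceeds, PySem.Str.strIsdigit_eq]
  by_cases h : PySem.Chars.strIsdigit ((pvLookup q ot).getD "").toList = true <;> simp [h]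

-- ===== VERDICT (by name: the statement is the Claim_ definition above) =====
theorem compare_questions_spec : Claim_equal_compare_questions := by
  intro aqc fv ot _ _
  show compare_questions aqc fv ot = compare_questions_alt aqc fv ot
  unfold compare_questions compare_questions_alt
  rw [bodyA_eq fv ot, foldl_keep_last_eq_reverse_find]
  cases aqc.reverse.find? (pvExceeds fv ot) <;> simp
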